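-- pv_equiv track=rewrite | github.com/Uporonier/t5-grpo-new | utils.py | docid2string_msmarco
-- ===== SOURCE A (Python) =====
-- from typing import Optional, Union, Dict, Any, List, Set
--
-- def docid2string_msmarco(ids: List[int]) -> str:
--     """
--     Script B 的核心逻辑：去除 0，保留第一个 1，截断后续。
--     """
--     seq: List[int] = []
--     for x in ids:
--         if x == 0: # 过滤 BOS/PAD
--             continue
--         if x == 1: # 遇到 EOS
--             seq.append(1)
--             break
--         seq.append(x)
--     return ",".join(map(str, seq))
-- ===== SOURCE B (Python) =====
-- def docid2string_msmarco(ids):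
--     # Boundary-find + slice + filter pipeline instead of a single filter-and-break loop.
--     if 1 in ids:
--         prefix = ids[:ids.index(1) + 1]
--     else:
--         prefix = ids
--     return ",".join(str(x) for x in prefix if x != 0)
-- ===== Notes on version B (the rewrite author's own statement) =====
-- stated objective: alternative
-- what changed: Replaces A's single filter-and-break accumulation loop with a pipeline: find the first 1 (index), slice the prefix up to and including it, filter out zeros, then join.
import Mathlib
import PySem

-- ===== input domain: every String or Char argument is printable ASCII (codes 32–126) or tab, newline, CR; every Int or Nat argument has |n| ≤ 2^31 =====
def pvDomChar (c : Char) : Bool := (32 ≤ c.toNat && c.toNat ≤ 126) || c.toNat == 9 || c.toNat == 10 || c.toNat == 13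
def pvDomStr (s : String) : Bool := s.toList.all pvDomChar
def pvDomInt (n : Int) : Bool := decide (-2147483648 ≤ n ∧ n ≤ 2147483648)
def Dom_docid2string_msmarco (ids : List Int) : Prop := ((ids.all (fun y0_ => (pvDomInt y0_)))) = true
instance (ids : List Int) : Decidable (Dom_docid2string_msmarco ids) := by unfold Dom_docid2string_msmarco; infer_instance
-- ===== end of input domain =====

-- B replaces A's single filter-and-break loop with a pipeline: find the first 1, slice the
-- prefix through it, filter out the zeros, join (objective: alternative decomposition).

-- ===== PORT A =====
-- the loop of A: accumulate x≠0, stop (keeping the 1) at the first 1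
def pvSeqA : List Int → List Int
  | [] => []
  | x :: xs =>
    if x = 0 then pvSeqA xs
    else if x = 1 then [1]
    else x :: pvSeqA xs

def docid2string_msmarco (ids : List Int) : String :=
  PySem.Str.join "," ((pvSeqA ids).map PySem.Int.toStr)

-- ===== PORT B =====
def docid2string_msmarco_alt (ids : List Int) : String :=
  let pre : List Int :=
    if (1 : Int) ∈ ids then
      match PySem.List.index? ids 1 with
      | some i => PySem.List.slice ids none (some ((i : Int) + 1))
      | none => ids
    else ids
  PySem.Str.join "," ((pre.filter (fun x => x ≠ 0)).map PySem.Int.toStr)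

-- ===== PRECONDITION & SPEC =====
def Spec_docid2string_msmarco (ids : List Int) (out : String) : Prop := out = docid2string_msmarco_alt ids
instance (ids : List Int) (out : String) : Decidable (Spec_docid2string_msmarco ids out) := by unfold Spec_docid2string_msmarco; infer_instance

-- ===== CLAIM (what is proved, stated in full; the proofs are below) =====
def Claim_equal_docid2string_msmarco : Prop := ∀ (ids : List Int), Dom_docid2string_msmarco ids → Spec_docid2string_msmarco ids (docid2string_msmarco ids)

-- ===== LEMMAS AND PROOFS =====

-- B's prefix, with the slice reduced to List.take
def pvPre (ids : List Int) : List Int :=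
  match PySem.List.index? ids 1 with
  | some i => ids.take (i + 1)
  | none => ids

lemma pvPre_eq (ids : List Int) :
    (if (1 : Int) ∈ ids then
      match PySem.List.index? ids 1 with
      | some i => PySem.List.slice ids none (some ((i : Int) + 1))
      | none => ids
    else ids) = pvPre ids := by
  by_cases h : (1 : Int) ∈ ids
  · simp only [if_pos h, pvPre]
    cases hi : PySem.List.index? ids 1 with
    | none => rfl
    | some i =>
      show PySem.List.slice ids none (some ((i : Int) + 1)) = ids.take (i + 1)
      have hcast : ((i : Int) + 1) = ((i + 1 : Nat) : Int) := by push_cast; ring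
      rw [hcast, PySem.List.slice_to_natCast]
  · have hnone : PySem.List.index? ids 1 = none := by
      rw [PySem.List.index?_eq_none_iff]; exact h
    simp only [if_neg h, pvPre, hnone]

lemma pvPre_cons_of_ne (x : Int) (xs : List Int) (hx1 : x ≠ 1) :
    pvPre (x :: xs) = x :: pvPre xs := by
  simp only [pvPre, PySem.List.index?_cons_of_ne xs hx1]
  cases hi : PySem.List.index? xs 1 with
  | none => simp
  | some i => simp [List.take_succ_cons]

lemma pvSeqA_eq_filter_pre (ids : List Int) :
    pvSeqA ids = (pvPre ids).filter (fun x => x ≠ 0) := by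
  induction ids with
  | nil => rfl
  | cons x xs ih =>
    by_cases hx1 : x = (1 : Int)
    · subst hx1
      simp only [pvPre, PySem.List.index?_cons_self]
      simp [pvSeqA]
    · rw [pvPre_cons_of_ne x xs hx1]
      by_cases hx0 : x = (0 : Int)
      · subst hx0
        simpa [pvSeqA, hx1] using ih
      · simp [pvSeqA, hx0, hx1, ih]

-- ===== VERDICT (by name: the statement is the Claim_ definition above) =====
theorem docid2string_msmarco_spec : Claim_equal_docid2string_msmarco := by
  intro ids _
  unfold Spec_docid2string_msmarco docid2string_msmarco docid2string_msmarco_alt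
  rw [pvPre_eq, pvSeqA_eq_filter_pre]
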